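-- pv_equiv track=rewrite | github.com/Vijay6923/Recursion-solution | contest3/div3.py/thorns and coins.py | max_coins_helper
-- ===== SOURCE A (Python) =====
-- def max_coins_helper(n, path, memo, idx):
--     if idx >= n:
--         return 0
--     if memo[idx] != -1:
--         return memo[idx]
--
--     if path[idx] == '*':
--         memo[idx] = max_coins_helper(n, path, memo, idx + 1)
--     else:
--         # Try moving one step and two steps
--         one_step = (1 if path[idx] == '@' else 0) + max_coins_helper(n, path, memo, idx + 1)
--         two_steps = (1 if path[idx] == '@' else 0) + max_coins_helper(n, path, memo, idx + 2)
--         memo[idx] = max(one_step, two_steps)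
--
--     return memo[idx]
-- ===== SOURCE B (Python) =====
-- def max_coins_helper(n, path, memo, idx):
--     if idx >= n:
--         return 0
--     for i in range(n - 1, idx - 1, -1):
--         if memo[i] != -1:
--             continue
--         nxt1 = memo[i + 1] if i + 1 < n else 0
--         if path[i] == '*':
--             memo[i] = nxt1
--         else:
--             coin = 1 if path[i] == '@' else 0
--             nxt2 = memo[i + 2] if i + 2 < n else 0
--             memo[i] = coin + max(nxt1, nxt2)
--     return memo[idx]
-- ===== Notes on version B (the rewrite author's own statement) =====
-- stated objective: alternative
-- what changed: Replaces top-down memoized recursion (mutating memo on the way back) with an iterative bottom-up DP loop filling memo from n-1 down to idx and reading neighbour cells directly.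
-- outside the precondition, e.g. on max_coins_helper(1, '@', [-1], -1): A returns 2, B returns 1; on max_coins_helper(5, '', [3], 0): A returns 3, B raises IndexError
import Mathlib
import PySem

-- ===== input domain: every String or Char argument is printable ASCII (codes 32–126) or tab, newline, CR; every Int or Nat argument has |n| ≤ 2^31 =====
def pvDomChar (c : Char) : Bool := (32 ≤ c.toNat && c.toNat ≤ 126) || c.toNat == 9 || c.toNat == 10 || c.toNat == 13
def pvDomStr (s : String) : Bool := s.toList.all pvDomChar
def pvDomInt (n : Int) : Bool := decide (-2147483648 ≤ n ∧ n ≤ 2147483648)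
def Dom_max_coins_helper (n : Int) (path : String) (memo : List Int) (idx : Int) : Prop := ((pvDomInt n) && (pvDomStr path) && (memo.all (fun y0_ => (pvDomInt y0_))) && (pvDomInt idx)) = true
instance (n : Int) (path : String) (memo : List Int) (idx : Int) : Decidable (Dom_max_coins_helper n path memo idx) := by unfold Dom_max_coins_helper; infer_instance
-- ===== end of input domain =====

-- B replaces A's top-down memoized recursion by an iterative bottom-up DP loop (alternative
-- decomposition, same cost). Both Pythons mutate `memo` in place; the equivalence proved here
-- is about the RETURN value only (the two programs may write different cells).

-- ===== PORT A =====
-- Literal port of A's memoized recursion; the mutated memo list is threaded as state.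
-- pyGetD/pySetD are exact under Pre_ (0 ≤ idx and all reached indices below n ≤ |memo|, |path|).
def maxCoinsRecA (n : Int) (path : List Char) (memo : List Int) (idx : Int) : Int × List Int :=
  if h : n ≤ idx then (0, memo)
  else
    let m := PySem.List.pyGetD memo idx (-1)
    if m ≠ -1 then (m, memo)
    else
      let c := PySem.List.pyGetD path idx ' '
      if c = '*' then
        let r := maxCoinsRecA n path memo (idx + 1)
        let memo2 := PySem.List.pySetD r.2 idx r.1
        (PySem.List.pyGetD memo2 idx (-1), memo2)
      else
        let coin : Int := if c = '@' then 1 else 0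
        let r1 := maxCoinsRecA n path memo (idx + 1)
        let one_step := coin + r1.1
        let r2 := maxCoinsRecA n path r1.2 (idx + 2)
        let two_steps := coin + r2.1
        let memo3 := PySem.List.pySetD r2.2 idx (max one_step two_steps)
        (PySem.List.pyGetD memo3 idx (-1), memo3)
termination_by (n - idx).toNat
decreasing_by all_goals omega

def max_coins_helper (n : Int) (path : String) (memo : List Int) (idx : Int) : Int :=
  (maxCoinsRecA n path.toList memo idx).1

-- ===== PORT B =====
-- One iteration of B's loop body at index i.
def stepB (n : Int) (path : List Char) (mem : List Int) (i : Int) : List Int :=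
  if PySem.List.pyGetD mem i (-1) ≠ -1 then mem
  else
    let nxt1 := if i + 1 < n then PySem.List.pyGetD mem (i + 1) 0 else 0
    let c := PySem.List.pyGetD path i ' '
    if c = '*' then PySem.List.pySetD mem i nxt1
    else
      let coin : Int := if c = '@' then 1 else 0
      let nxt2 := if i + 2 < n then PySem.List.pyGetD mem (i + 2) 0 else 0
      PySem.List.pySetD mem i (coin + max nxt1 nxt2)

-- B's `for i in range(n-1, idx-1, -1)` loop: processes i, i-1, …, idx.
def loopB (n : Int) (path : List Char) (idx : Int) (i : Int) (mem : List Int) : List Int :=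
  if h : i < idx then mem
  else loopB n path idx (i - 1) (stepB n path mem i)
termination_by (i - idx + 1).toNat
decreasing_by omega

def max_coins_helper_alt (n : Int) (path : String) (memo : List Int) (idx : Int) : Int :=
  if n ≤ idx then 0
  else PySem.List.pyGetD (loopB n path.toList idx (n - 1) memo) idx (-1)

-- ===== PRECONDITION & SPEC =====
-- Pre_ excludes (though A still returns on some of them) negative idx with idx < n, where
-- Python's negative-index wraparound makes both programs read/write aliased cells in an
-- accidental order, and inputs with memo or path shorter than n, where the traversal
-- generally raises IndexError and any returned value depends on which cells happen to be
-- pre-filled.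
def Pre_max_coins_helper (n : Int) (path : String) (memo : List Int) (idx : Int) : Prop :=
  idx < n → (0 ≤ idx ∧ n ≤ (memo.length : Int) ∧ n ≤ (path.toList.length : Int))
instance (n : Int) (path : String) (memo : List Int) (idx : Int) : Decidable (Pre_max_coins_helper n path memo idx) := by unfold Pre_max_coins_helper; infer_instance

def pvWitness_max_coins_helper : Int × String × List Int × Int := (2, "@*", [-1, -1], 0)

def Spec_max_coins_helper (n : Int) (path : String) (memo : List Int) (idx : Int) (out : Int) : Prop := out = max_coins_helper_alt n path memo idx
instance (n : Int) (path : String) (memo : List Int) (idx : Int) (out : Int) : Decidable (Spec_max_coins_helper n path memo idx out) := by unfold Spec_max_coins_helper; infer_instance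

-- ===== CLAIM (what is proved, stated in full; the proofs are below) =====
def Claim_equal_max_coins_helper : Prop := ∀ (n : Int) (path : String) (memo : List Int) (idx : Int), Dom_max_coins_helper n path memo idx → Pre_max_coins_helper n path memo idx → Spec_max_coins_helper n path memo idx (max_coins_helper n path memo idx)

-- ===== LEMMAS AND PROOFS =====
-- specV: the common value function both programs compute, defined by pure recursion on the
-- ORIGINAL (never mutated) memo.
def specV (n : Int) (path : List Char) (memo : List Int) (i : Int) : Int :=
  if h : n ≤ i then 0
  else
    let m := PySem.List.pyGetD memo i (-1)
    if m ≠ -1 then m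
    else
      let c := PySem.List.pyGetD path i ' '
      if c = '*' then specV n path memo (i + 1)
      else
        let coin : Int := if c = '@' then 1 else 0
        max (coin + specV n path memo (i + 1)) (coin + specV n path memo (i + 2))
termination_by (n - i).toNat
decreasing_by all_goals omega

lemma specV_of_le {n i : Int} (path : List Char) (memo : List Int) (h : n ≤ i) :
    specV n path memo i = 0 := by rw [specV]; simp [h]

lemma specV_of_memo {n i : Int} (path : List Char) (memo : List Int) (h : ¬ n ≤ i)
    (hm : PySem.List.pyGetD memo i (-1) ≠ -1) :
    specV n path memo i = PySem.List.pyGetD memo i (-1) := by rw [specV]; simp [h, hm]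

lemma specV_of_star {n i : Int} (path : List Char) (memo : List Int) (h : ¬ n ≤ i)
    (hm : PySem.List.pyGetD memo i (-1) = -1) (hc : PySem.List.pyGetD path i ' ' = '*') :
    specV n path memo i = specV n path memo (i + 1) := by rw [specV]; simp [h, hm, hc]

lemma specV_of_walk {n i : Int} (path : List Char) (memo : List Int) (h : ¬ n ≤ i)
    (hm : PySem.List.pyGetD memo i (-1) = -1) (hc : PySem.List.pyGetD path i ' ' ≠ '*') :
    specV n path memo i = max ((if PySem.List.pyGetD path i ' ' = '@' then (1:Int) else 0) + specV n path memo (i + 1))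
      ((if PySem.List.pyGetD path i ' ' = '@' then (1:Int) else 0) + specV n path memo (i + 2)) := by
  rw [specV]; simp [h, hm, hc]

def Good (n : Int) (path : List Char) (mem mem' : List Int) : Prop :=
  mem'.length = mem.length ∧
    ∀ i : Int, 0 ≤ i →
      PySem.List.pyGetD mem' i (-1) = PySem.List.pyGetD mem i (-1) ∨
      (PySem.List.pyGetD mem i (-1) = -1 ∧
        PySem.List.pyGetD mem' i (-1) = specV n path mem i)

lemma specV_good (n : Int) (path : List Char) (mem mem' : List Int)
    (hg : Good n path mem mem') :
    ∀ i : Int, 0 ≤ i → specV n path mem' i = specV n path mem i := by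
  have main : ∀ (k : Nat) (i : Int), 0 ≤ i → (n - i).toNat ≤ k →
      specV n path mem' i = specV n path mem i := by
    intro k
    induction k with
    | zero =>
      intro i hi hk
      rw [specV_of_le path mem' (by omega), specV_of_le path mem (by omega)]
    | succ k ih =>
      intro i hi hk
      by_cases hni : n ≤ i
      · rw [specV_of_le path mem' hni, specV_of_le path mem hni]
      have h1 : specV n path mem' (i+1) = specV n path mem (i+1) := ih (i+1) (by omega) (by omega)
      have h2 : specV n path mem' (i+2) = specV n path mem (i+2) := ih (i+2) (by omega) (by omega)
      rcases hg.2 i hi with heq | ⟨hm1, hval⟩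
      · by_cases hm : PySem.List.pyGetD mem i (-1) ≠ -1
        · rw [specV_of_memo path mem' hni (heq ▸ hm), specV_of_memo path mem hni hm, heq]
        · rw [not_ne_iff] at hm
          by_cases hc : PySem.List.pyGetD path i ' ' = '*'
          · rw [specV_of_star path mem' hni (heq ▸ hm) hc, specV_of_star path mem hni hm hc, h1]
          · rw [specV_of_walk path mem' hni (heq ▸ hm) hc, specV_of_walk path mem hni hm hc, h1, h2]
      · -- original cell was -1, mem' holds its specV value
        have hspec : specV n path mem i = (if PySem.List.pyGetD path i ' ' = '*' then specV n path mem (i+1)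
            else max ((if PySem.List.pyGetD path i ' ' = '@' then (1:Int) else 0) + specV n path mem (i + 1))
              ((if PySem.List.pyGetD path i ' ' = '@' then (1:Int) else 0) + specV n path mem (i + 2))) := by
          by_cases hc : PySem.List.pyGetD path i ' ' = '*'
          · rw [if_pos hc]; exact specV_of_star path mem hni hm1 hc
          · rw [if_neg hc]; exact specV_of_walk path mem hni hm1 hc
        by_cases hv : specV n path mem i = -1
        · -- mem' cell is -1 too: mem' recomputes, giving the same value by ih
          have hm' : PySem.List.pyGetD mem' i (-1) = -1 := by rw [hval, hv]
          by_cases hc : PySem.List.pyGetD path i ' ' = '*'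
          · rw [specV_of_star path mem' hni hm' hc, specV_of_star path mem hni hm1 hc, h1]
          · rw [specV_of_walk path mem' hni hm' hc, specV_of_walk path mem hni hm1 hc, h1, h2]
        · rw [specV_of_memo path mem' hni (by rw [hval]; exact hv), hval]
  intro i hi; exact main (n - i).toNat i hi le_rfl

lemma good_trans (n : Int) (path : List Char) (m1 m2 m3 : List Int)
    (h12 : Good n path m1 m2) (h23 : Good n path m2 m3) : Good n path m1 m3 := by
  refine ⟨h23.1.trans h12.1, fun i hi => ?_⟩
  have hV := specV_good n path m1 m2 h12 i hi
  rcases h23.2 i hi with heq | ⟨hm2, hval⟩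
  · rcases h12.2 i hi with heq' | ⟨hm1, hval'⟩
    · exact Or.inl (heq.trans heq')
    · exact Or.inr ⟨hm1, heq.trans hval'⟩
  · rcases h12.2 i hi with heq' | ⟨hm1, hval'⟩
    · exact Or.inr ⟨heq' ▸ hm2, by rw [hval, hV]⟩
    · refine Or.inr ⟨hm1, ?_⟩
      rw [hval, hV]

lemma getD_setD_int (mem : List Int) (j i v d : Int) (hj0 : 0 ≤ j) (hi0 : 0 ≤ i) :
    PySem.List.pyGetD (PySem.List.pySetD mem j v) i d
      = if i = j ∧ j < (mem.length : Int) then v else PySem.List.pyGetD mem i d := by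
  rcases lt_or_ge j (mem.length : Int) with hjl | hjl
  · rw [show j = ((j.toNat : Nat) : Int) by omega, show i = ((i.toNat : Nat) : Int) by omega,
      PySem.List.pyGetD_pySetD_natCast mem j.toNat i.toNat v d (by omega)]
    split_ifs with h1 h2 <;> first | rfl | omega
  · rw [PySem.List.pySetD_of_nonneg mem v hj0, List.set_eq_of_length_le (by omega),
      if_neg (by omega)]

lemma good_refl (n : Int) (path : List Char) (mem : List Int) : Good n path mem mem :=
  ⟨rfl, fun _ _ => Or.inl rfl⟩

lemma recA_spec (n : Int) (path : List Char) :
    ∀ (k : Nat) (idx : Int) (mem : List Int), (n - idx).toNat ≤ k → 0 ≤ idx →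
      n ≤ (mem.length : Int) →
      (maxCoinsRecA n path mem idx).1 = specV n path mem idx ∧
        Good n path mem (maxCoinsRecA n path mem idx).2 := by
  intro k
  induction k with
  | zero =>
    intro idx mem hk h0 hm
    rw [maxCoinsRecA]
    have hni : n ≤ idx := by omega
    simp only [dif_pos hni]
    exact ⟨(specV_of_le path mem hni).symm, good_refl n path mem⟩
  | succ k ih =>
    intro idx mem hk h0 hm
    rw [maxCoinsRecA]
    by_cases hni : n ≤ idx
    · simp only [dif_pos hni]
      exact ⟨(specV_of_le path mem hni).symm, good_refl n path mem⟩
    simp only [dif_neg hni]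
    by_cases hmm : PySem.List.pyGetD mem idx (-1) ≠ -1
    · simp only [if_pos hmm]
      exact ⟨(specV_of_memo path mem hni hmm).symm, good_refl n path mem⟩
    simp only [if_neg hmm]
    have hmm1 : PySem.List.pyGetD mem idx (-1) = -1 := not_ne_iff.mp hmm
    have h1 := ih (idx + 1) mem (by omega) (by omega) hm
    have hlen1 : (maxCoinsRecA n path mem (idx + 1)).2.length = mem.length := h1.2.1
    by_cases hc : PySem.List.pyGetD path idx ' ' = '*'
    · simp only [if_pos hc]
      have hset := getD_setD_int (maxCoinsRecA n path mem (idx + 1)).2 idx idx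
        (maxCoinsRecA n path mem (idx + 1)).1 (-1) h0 h0
      constructor
      · rw [hset, if_pos ⟨rfl, by omega⟩, h1.1, ← specV_of_star path mem hni hmm1 hc]
      · refine ⟨by rw [PySem.List.length_pySetD, hlen1], fun i hi => ?_⟩
        rw [getD_setD_int _ _ _ _ _ h0 hi]
        by_cases hii : i = idx ∧ idx < ((maxCoinsRecA n path mem (idx + 1)).2.length : Int)
        · rw [if_pos hii, hii.1]
          exact Or.inr ⟨hmm1, by rw [h1.1, ← specV_of_star path mem hni hmm1 hc]⟩
        · rw [if_neg hii]
          exact h1.2.2 i hi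
    · simp only [if_neg hc]
      have h2 := ih (idx + 2) (maxCoinsRecA n path mem (idx + 1)).2 (by omega) (by omega)
        (by rw [hlen1]; exact hm)
      have hg : Good n path mem (maxCoinsRecA n path (maxCoinsRecA n path mem (idx + 1)).2 (idx + 2)).2 :=
        good_trans n path _ _ _ h1.2 h2.2
      have hv2 : (maxCoinsRecA n path (maxCoinsRecA n path mem (idx + 1)).2 (idx + 2)).1
          = specV n path mem (idx + 2) := by
        rw [h2.1, specV_good n path mem _ h1.2 (idx + 2) (by omega)]
      have hval : max ((if PySem.List.pyGetD path idx ' ' = '@' then (1:Int) else 0) + (maxCoinsRecA n path mem (idx + 1)).1)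
          ((if PySem.List.pyGetD path idx ' ' = '@' then (1:Int) else 0) + (maxCoinsRecA n path (maxCoinsRecA n path mem (idx + 1)).2 (idx + 2)).1)
          = specV n path mem idx := by
        rw [h1.1, hv2, ← specV_of_walk path mem hni hmm1 hc]
      have hlen2 : (maxCoinsRecA n path (maxCoinsRecA n path mem (idx + 1)).2 (idx + 2)).2.length = mem.length := hg.1
      constructor
      · rw [getD_setD_int _ _ _ _ _ h0 h0, if_pos ⟨rfl, by omega⟩, hval]
      · refine ⟨by rw [PySem.List.length_pySetD, hg.1], fun i hi => ?_⟩
        rw [getD_setD_int _ _ _ _ _ h0 hi]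
        by_cases hii : i = idx ∧ idx < (((maxCoinsRecA n path (maxCoinsRecA n path mem (idx + 1)).2 (idx + 2)).2.length : Nat) : Int)
        · rw [if_pos hii, hii.1]
          exact Or.inr ⟨hmm1, hval⟩
        · rw [if_neg hii]
          exact hg.2 i hi

lemma loopB_spec (n : Int) (path : List Char) (memo0 : List Int) (idx : Int)
    (h0 : 0 ≤ idx) (hm : n ≤ (memo0.length : Int)) :
    ∀ (k : Nat) (i : Int) (mem : List Int), (i - idx + 1).toNat ≤ k →
      idx - 1 ≤ i → i < n → mem.length = memo0.length →
      (∀ j : Int, 0 ≤ j → j ≤ i → PySem.List.pyGetD mem j (-1) = PySem.List.pyGetD memo0 j (-1)) →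
      (∀ j : Int, i < j → j < n → PySem.List.pyGetD mem j (-1) = specV n path memo0 j) →
      ∀ j : Int, idx ≤ j → j < n →
        PySem.List.pyGetD (loopB n path idx i mem) j (-1) = specV n path memo0 j := by
  intro k
  induction k with
  | zero =>
    intro i mem hk hlow hhi hlen hpre hpost j hj1 hj2
    rw [loopB]
    simp only [dif_pos (show i < idx by omega)]
    exact hpost j (by omega) hj2
  | succ k ih =>
    intro i mem hk hlow hhi hlen hpre hpost j hj1 hj2
    by_cases hcase : i < idx
    · rw [loopB]
      simp only [dif_pos hcase]
      exact hpost j (by omega) hj2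
    rw [loopB]
    simp only [dif_neg hcase]
    have hi0 : 0 ≤ i := by omega
    have hmlen : n ≤ (mem.length : Int) := by simp only [hlen]; exact hm
    have hgi : PySem.List.pyGetD mem i (-1) = PySem.List.pyGetD memo0 i (-1) := hpre i hi0 le_rfl
    by_cases hmmI : PySem.List.pyGetD mem i (-1) ≠ -1
    · have hstep : stepB n path mem i = mem := by rw [stepB]; simp [hmmI]
      rw [hstep]
      refine ih (i - 1) mem (by omega) (by omega) (by omega) hlen
        (fun j' a b => hpre j' a (by omega)) (fun j' a b => ?_) j hj1 hj2
      by_cases hji : j' = i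
      · subst hji
        rw [hgi, specV_of_memo path memo0 (by omega) (hgi ▸ hmmI)]
      · exact hpost j' (by omega) b
    · have hmm1 : PySem.List.pyGetD mem i (-1) = -1 := not_ne_iff.mp hmmI
      have hg0 : PySem.List.pyGetD memo0 i (-1) = -1 := hgi ▸ hmm1
      have e1 : i + 1 < n → PySem.List.pyGetD mem (i + 1) 0 = PySem.List.pyGetD mem (i + 1) (-1) := by
        intro h
        rw [PySem.List.pyGetD_eq_getElem mem (0:Int) (by omega) (by omega),
          PySem.List.pyGetD_eq_getElem mem (-1:Int) (by omega) (by omega)]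
      have e2 : i + 2 < n → PySem.List.pyGetD mem (i + 2) 0 = PySem.List.pyGetD mem (i + 2) (-1) := by
        intro h
        rw [PySem.List.pyGetD_eq_getElem mem (0:Int) (by omega) (by omega),
          PySem.List.pyGetD_eq_getElem mem (-1:Int) (by omega) (by omega)]
      have hn1 : (if i + 1 < n then PySem.List.pyGetD mem (i + 1) 0 else 0) = specV n path memo0 (i + 1) := by
        split_ifs with h
        · rw [e1 h, hpost (i + 1) (by omega) h]
        · exact (specV_of_le path memo0 (by omega)).symm
      have hn2 : (if i + 2 < n then PySem.List.pyGetD mem (i + 2) 0 else 0) = specV n path memo0 (i + 2) := by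
        split_ifs with h
        · rw [e2 h, hpost (i + 2) (by omega) h]
        · exact (specV_of_le path memo0 (by omega)).symm
      have hfill : ∀ v : Int, v = specV n path memo0 i →
          ∀ j : Int, idx ≤ j → j < n →
            PySem.List.pyGetD (loopB n path idx (i - 1) (PySem.List.pySetD mem i v)) j (-1)
              = specV n path memo0 j := by
        intro v hv
        refine ih (i - 1) _ (by omega) (by omega) (by omega)
          (by rw [PySem.List.length_pySetD]; exact hlen) (fun j' a b => ?_) (fun j' a b => ?_)
        · rw [getD_setD_int mem i j' v (-1) hi0 a, if_neg (by rintro ⟨e, -⟩; omega)]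
          exact hpre j' a (by omega)
        · rw [getD_setD_int mem i j' v (-1) hi0 (by omega)]
          by_cases e : j' = i
          · rw [if_pos ⟨e, by omega⟩, hv, e]
          · rw [if_neg (by rintro ⟨e', -⟩; exact e e')]
            exact hpost j' (by omega) b
      by_cases hc : PySem.List.pyGetD path i ' ' = '*'
      · have hstep : stepB n path mem i
            = PySem.List.pySetD mem i (if i + 1 < n then PySem.List.pyGetD mem (i + 1) 0 else 0) := by
          rw [stepB]; simp [hmm1, hc]
        rw [hstep]
        exact hfill _ (by rw [hn1, ← specV_of_star path memo0 (by omega) hg0 hc]) j hj1 hj2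
      · have hstep : stepB n path mem i
            = PySem.List.pySetD mem i ((if PySem.List.pyGetD path i ' ' = '@' then (1:Int) else 0)
              + max (if i + 1 < n then PySem.List.pyGetD mem (i + 1) 0 else 0)
                    (if i + 2 < n then PySem.List.pyGetD mem (i + 2) 0 else 0)) := by
          rw [stepB]; simp [hmm1, hc]
        rw [hstep]
        refine hfill _ ?_ j hj1 hj2
        rw [hn1, hn2, ← max_add_add_left, ← specV_of_walk path memo0 (by omega) hg0 hc]

-- ===== VERDICT (by name: the statement is the Claim_ definition above) =====
theorem max_coins_helper_spec : Claim_equal_max_coins_helper := by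
  intro n path memo idx _hdom hpre
  unfold Spec_max_coins_helper max_coins_helper max_coins_helper_alt
  by_cases hlt : idx < n
  · obtain ⟨h0, hm, _⟩ := hpre hlt
    rw [if_neg (by omega)]
    have hA := (recA_spec n path.toList (n - idx).toNat idx memo le_rfl h0 hm).1
    have hB := loopB_spec n path.toList memo idx h0 hm (n - 1 - idx + 1).toNat (n - 1) memo
      le_rfl (by omega) (by omega) rfl (fun _ _ _ => rfl)
      (fun j hj1 hj2 => absurd hj2 (by omega)) idx le_rfl hlt
    rw [hA, hB]
  · rw [if_pos (by omega), maxCoinsRecA]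
    simp [dif_pos (by omega : n ≤ idx)]
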